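-- pv_equiv track=rewrite | github.com/JOHNNY-fans/KG-o1 | src/Logical_Triplets_Generation/getcluster.py | find_paths_to_leaf
-- ===== SOURCE A (Python) =====
-- from collections import defaultdict,deque
--
-- def find_paths_to_leaf(group, group_relationships, leaf_list):
--     paths = []
--     leaf = [i for i in leaf_list if i != group]
--     leaf_set = set(leaf)
--
--     queue = deque([(group, [])])
--
--     while queue:
--         current_group, path = queue.popleft()
--         visited = {node for edge in path for node in (edge[0], edge[2])}
--
--         has_next = False
--         for (head_group, relation, tail_group), count in group_relationships.items():
--             if head_group == current_group or tail_group == current_group: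
--                 next_group = tail_group if head_group == current_group else head_group
--                 if next_group not in visited:
--                     has_next = True
--                     new_path = path + [(head_group, relation, tail_group)]
--                     queue.append((next_group, new_path))
--
--         if not has_next and current_group in leaf_set:
--             paths.append(path)
--
--     return paths
-- ===== SOURCE B (Python) =====
-- from collections import deque
--
-- def find_paths_to_leaf(group, group_relationships, leaf_list):
--     leaf_set = set(leaf_list) - {group}
--     # adjacency index: node -> list of (neighbour, edge triple), in input order
--     adj = {}
--     for h, r, t in group_relationships:
--         adj.setdefault(h, []).append((t, (h, r, t)))
--         if t != h:
--             adj.setdefault(t, []).append((h, (h, r, t)))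
--     paths = []
--     queue = deque([(group, [], frozenset())])
--     while queue:
--         cur, path, visited = queue.popleft()
--         children = [(n, path + [e], visited | {e[0], e[2]})
--                     for n, e in adj.get(cur, ()) if n not in visited]
--         if children:
--             queue.extend(children)
--         elif cur in leaf_set:
--             paths.append(path)
--     return paths
-- ===== Notes on version B (the rewrite author's own statement) =====
-- stated objective: alternative
-- what changed: B precomputes a node->(neighbour,edge) adjacency index once and carries each path's visited set incrementally in the queue, generating all children of a node with one comprehension over its adjacency list and testing that list for emptiness, instead of A's rescan of every relationship with a has_next flag and a rebuild of the visited set from the whole path at each expansion.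
import Mathlib
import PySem

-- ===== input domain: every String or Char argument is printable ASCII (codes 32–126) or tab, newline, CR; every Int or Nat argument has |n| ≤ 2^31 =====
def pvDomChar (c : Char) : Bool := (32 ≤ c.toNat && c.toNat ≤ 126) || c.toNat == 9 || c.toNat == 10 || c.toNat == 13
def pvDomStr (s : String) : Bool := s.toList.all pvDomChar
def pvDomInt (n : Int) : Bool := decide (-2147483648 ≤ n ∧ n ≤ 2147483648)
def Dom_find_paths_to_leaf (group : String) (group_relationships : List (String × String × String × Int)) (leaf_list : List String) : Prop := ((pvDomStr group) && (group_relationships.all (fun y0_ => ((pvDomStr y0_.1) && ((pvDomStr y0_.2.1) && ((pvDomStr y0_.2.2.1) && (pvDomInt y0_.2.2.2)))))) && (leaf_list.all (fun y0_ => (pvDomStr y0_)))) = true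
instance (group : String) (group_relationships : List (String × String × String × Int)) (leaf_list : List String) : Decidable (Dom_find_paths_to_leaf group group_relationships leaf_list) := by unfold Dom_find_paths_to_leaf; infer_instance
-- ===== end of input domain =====

-- B replaces A's per-expansion scan of all relationships (with its has_next flag and the
-- visited set rebuilt from the whole path) by a precomputed node->(neighbour,edge)
-- adjacency index, a visited set carried incrementally with each queue entry, and a
-- single comprehension producing all children of a node, branching on its emptiness
-- (an alternative algorithm; not measured faster on the timed inputs).
-- In both ports the dict argument's keys (the triples; the counts are never used by the
-- Python) are deduplicated to first occurrences, exactly as a Python dict holds them.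
-- The BFS while-loops are ported as fuel recursion; the fuel bounds the number of pops
-- ((E+1)^(2E+2) ≥ number of simple paths) and only makes the recursion total.

-- ===== PORT A =====
-- visited = {node for edge in path for node in (edge[0], edge[2])}
def pvVisitedA (path : List (String × String × String)) : PySem.Set String :=
  path.foldl (fun s e => PySem.Set.add (PySem.Set.add s e.1) e.2.2) PySem.Set.empty

-- the inner 'for (head, relation, tail), count in group_relationships.items():' body
def pvStepA (edges : List (String × String × String)) (current : String)
    (path : List (String × String × String)) :
    Bool × List (String × List (String × String × String)) :=
  let visited := pvVisitedA path
  edges.foldl (fun acc e =>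
    if e.1 == current || e.2.2 == current then
      let nxt := if e.1 == current then e.2.2 else e.1
      if PySem.Set.contains visited nxt then acc
      else (true, acc.2 ++ [(nxt, path ++ [e])])
    else acc) (false, [])

-- the 'while queue:' loop (fuel only makes it total; it is never exhausted in Python)
def pvLoopA (edges : List (String × String × String)) (leafSet : PySem.Set String) :
    Nat → List (String × List (String × String × String)) →
    List (List (String × String × String)) → List (List (String × String × String))
  | _, [], paths => paths
  | 0, _, paths => paths
  | fuel+1, (current, path) :: queue, paths =>
    let r := pvStepA edges current path
    pvLoopA edges leafSet fuel (queue ++ r.2)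
      (if !r.1 && PySem.Set.contains leafSet current then paths ++ [path] else paths)

def find_paths_to_leaf (group : String) (group_relationships : List (String × String × String × Int)) (leaf_list : List String) : List (List (String × String × String)) :=
  -- dict keys in insertion order (counts unused): dedup of the key triples
  let edges := PySem.List.dedup (group_relationships.map (fun e => (e.1, e.2.1, e.2.2.1)))
  let leafSet := PySem.Set.ofList (leaf_list.filter (fun i => i != group))
  pvLoopA edges leafSet ((edges.length + 1) ^ (2 * edges.length + 2)) [(group, [])] []

-- ===== PORT B =====
-- adj.setdefault(h, []).append((t, (h,r,t))); if t != h: adj.setdefault(t, []).append((h, (h,r,t)))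
def pvAdj (edges : List (String × String × String)) :
    PySem.Dict String (List (String × (String × String × String))) :=
  edges.foldl (fun d e =>
    let d1 := PySem.Dict.modify d e.1 [] (· ++ [(e.2.2, e)])
    if e.2.2 != e.1 then PySem.Dict.modify d1 e.2.2 [] (· ++ [(e.1, e)]) else d1)
    PySem.Dict.empty

-- children = [(n, path + [e], visited | {e[0], e[2]}) for n, e in adj.get(cur, ()) if n not in visited]
def pvChildren (adj : PySem.Dict String (List (String × (String × String × String))))
    (cur : String) (path : List (String × String × String)) (visited : PySem.Set String) :
    List (String × List (String × String × String) × PySem.Set String) :=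
  (adj.getD cur []).filterMap (fun c =>
    if PySem.Set.contains visited c.1 then none
    else some (c.1, path ++ [c.2], PySem.Set.add (PySem.Set.add visited c.2.1) c.2.2.2))

-- 'if children: queue.extend(children) elif cur in leaf_set: paths.append(path)'
def pvRun (adj : PySem.Dict String (List (String × (String × String × String))))
    (leafSet : PySem.Set String) :
    Nat → List (String × List (String × String × String) × PySem.Set String) →
    List (List (String × String × String)) → List (List (String × String × String))
  | _, [], paths => paths
  | 0, _, paths => paths
  | fuel+1, (cur, path, visited) :: rest, paths =>
    let cs := pvChildren adj cur path visited
    if cs.isEmpty then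
      pvRun adj leafSet fuel rest
        (if PySem.Set.contains leafSet cur then paths ++ [path] else paths)
    else pvRun adj leafSet fuel (rest ++ cs) paths

def find_paths_to_leaf_alt (group : String) (group_relationships : List (String × String × String × Int)) (leaf_list : List String) : List (List (String × String × String)) :=
  -- leaf_set = set(leaf_list) - {group}
  let leafSet := PySem.Set.diff (PySem.Set.ofList leaf_list) (PySem.Set.ofList [group])
  let edges := PySem.List.dedup (group_relationships.map (fun e => (e.1, e.2.1, e.2.2.1)))
  pvRun (pvAdj edges) leafSet ((edges.length + 1) ^ (2 * edges.length + 2))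
    [(group, [], PySem.Set.empty)] []

-- ===== PRECONDITION & SPEC =====
def Spec_find_paths_to_leaf (group : String) (group_relationships : List (String × String × String × Int)) (leaf_list : List String) (out : List (List (String × String × String))) : Prop := out = find_paths_to_leaf_alt group group_relationships leaf_list
instance (group : String) (group_relationships : List (String × String × String × Int)) (leaf_list : List String) (out : List (List (String × String × String))) : Decidable (Spec_find_paths_to_leaf group group_relationships leaf_list out) := by unfold Spec_find_paths_to_leaf; infer_instance

-- ===== CLAIM (what is proved, stated in full; the proofs are below) =====
def Claim_equal_find_paths_to_leaf : Prop := ∀ (group : String) (group_relationships : List (String × String × String × Int)) (leaf_list : List String), Dom_find_paths_to_leaf group group_relationships leaf_list → Spec_find_paths_to_leaf group group_relationships leaf_list (find_paths_to_leaf group group_relationships leaf_list)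

-- ===== LEMMAS AND PROOFS =====

-- the (neighbour, edge) entry B's adjacency index holds at lookup key c for an edge:
-- exactly the edges A's scan matches at c, with A's choice of neighbour
def pvSelB (c : String) (e : String × String × String) :
    Option (String × (String × String × String)) :=
  if e.1 == c then some (e.2.2, e)
  else if e.2.2 == c then some (e.1, e) else none

def pvAdjF (d : PySem.Dict String (List (String × (String × String × String))))
    (e : String × String × String) :
    PySem.Dict String (List (String × (String × String × String))) :=
  let d1 := PySem.Dict.modify d e.1 [] (· ++ [(e.2.2, e)])
  if e.2.2 != e.1 then PySem.Dict.modify d1 e.2.2 [] (· ++ [(e.1, e)]) else d1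

theorem pvAdjF_getD (d : PySem.Dict String (List (String × (String × String × String))))
    (e : String × String × String) (c : String) :
    (pvAdjF d e).getD c [] = d.getD c [] ++ (pvSelB c e).toList := by
  obtain ⟨h, r, t⟩ := e
  simp only [pvAdjF, pvSelB, bne_iff_ne, beq_iff_eq,
    apply_ite (fun x : PySem.Dict String (List (String × (String × String × String))) => x.getD c []),
    PySem.Dict.getD_modify]
  split_ifs <;> subst_vars <;> simp_all

theorem pvAdj_getD_gen (edges : List (String × String × String)) (c : String) :
    ∀ d : PySem.Dict String (List (String × (String × String × String))),
      (edges.foldl pvAdjF d).getD c [] = d.getD c [] ++ edges.filterMap (pvSelB c) := by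
  induction edges with
  | nil => intro d; simp
  | cons e rest ih =>
    intro d
    rw [List.foldl_cons, ih (pvAdjF d e), pvAdjF_getD]
    cases hse : pvSelB c e <;> simp [hse]

theorem pvAdj_getD (edges : List (String × String × String)) (c : String) :
    (pvAdj edges).getD c [] = edges.filterMap (pvSelB c) := by
  have h0 : pvAdj edges = edges.foldl pvAdjF PySem.Dict.empty := rfl
  rw [h0, pvAdj_getD_gen]
  simp

-- B's comprehension as one filterMap over the raw edges
def pvG (c : String) (p : List (String × String × String)) (v : PySem.Set String)
    (e : String × String × String) :
    Option (String × List (String × String × String) × PySem.Set String) :=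
  match pvSelB c e with
  | none => none
  | some nt =>
    if PySem.Set.contains v nt.1 then none
    else some (nt.1, p ++ [nt.2], PySem.Set.add (PySem.Set.add v nt.2.1) nt.2.2.2)

theorem pvChildren_eq (edges : List (String × String × String)) (c : String)
    (p : List (String × String × String)) (v : PySem.Set String) :
    pvChildren (pvAdj edges) c p v = edges.filterMap (pvG c p v) := by
  rw [pvChildren, pvAdj_getD, List.filterMap_filterMap]
  congr 1
  funext e
  cases hse : pvSelB c e <;> simp [pvG, hse]

-- correspondence between an A queue entry and a B queue entry
def pvRel (a : String × List (String × String × String))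
    (b : String × List (String × String × String) × PySem.Set String) : Prop :=
  b.1 = a.1 ∧ b.2.1 = a.2 ∧ ∀ x : String, x ∈ b.2.2 ↔ x ∈ pvVisitedA a.2

theorem pvVisitedA_append (p : List (String × String × String))
    (e : String × String × String) :
    pvVisitedA (p ++ [e]) = PySem.Set.add (PySem.Set.add (pvVisitedA p) e.1) e.2.2 := by
  simp [pvVisitedA, List.foldl_append]

theorem pvForall₂_append {α β : Type} {R : α → β → Prop} {l₁ u₁ : List α} {l₂ u₂ : List β}
    (h : List.Forall₂ R l₁ l₂) (h' : List.Forall₂ R u₁ u₂) :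
    List.Forall₂ R (l₁ ++ u₁) (l₂ ++ u₂) := by
  induction h with
  | nil => exact h'
  | cons hab _ ih => exact List.Forall₂.cons hab ih

-- A's inner-loop body, as a named function (definitionally that of pvStepA)
def pvFA (c : String) (p : List (String × String × String)) :
    Bool × List (String × List (String × String × String)) → (String × String × String) →
    Bool × List (String × List (String × String × String)) := fun acc e =>
  if e.1 == c || e.2.2 == c then
    let nxt := if e.1 == c then e.2.2 else e.1
    if PySem.Set.contains (pvVisitedA p) nxt then acc
    else (true, acc.2 ++ [(nxt, p ++ [e])])
  else acc

theorem pvStepRel (c : String) (p : List (String × String × String)) (v : PySem.Set String)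
    (hv : ∀ x : String, x ∈ v ↔ x ∈ pvVisitedA p) :
    ∀ (es : List (String × String × String))
      (accA : Bool × List (String × List (String × String × String)))
      (lB : List (String × List (String × String × String) × PySem.Set String)),
      accA.1 = !accA.2.isEmpty → List.Forall₂ pvRel accA.2 lB →
      (es.foldl (pvFA c p) accA).1 = !((es.foldl (pvFA c p) accA).2).isEmpty
      ∧ List.Forall₂ pvRel (es.foldl (pvFA c p) accA).2 (lB ++ es.filterMap (pvG c p v)) := by
  intro es
  induction es with
  | nil => intro accA lB h1 h2; simpa using ⟨h1, h2⟩
  | cons e rest ih =>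
    intro accA lB h1 h2
    obtain ⟨h, rl, t⟩ := e
    have hrel : ∀ nx : String,
        pvRel (nx, p ++ [(h, rl, t)])
          (nx, p ++ [(h, rl, t)], PySem.Set.add (PySem.Set.add v h) t) := by
      intro nx
      refine ⟨rfl, rfl, ?_⟩
      intro x
      rw [pvVisitedA_append]
      simp only [PySem.Set.mem_add]
      exact or_congr (or_congr (hv x) Iff.rfl) Iff.rfl
    rw [List.foldl_cons]
    by_cases hc1 : h = c
    · have hsel : pvSelB c (h, rl, t) = some (t, (h, rl, t)) := by
        simp only [pvSelB]
        rw [if_pos (beq_iff_eq.mpr hc1)]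
      by_cases hb : t ∈ pvVisitedA p
      · have hbv : t ∈ v := (hv t).mpr hb
        have hA : pvFA c p accA (h, rl, t) = accA := by simp [pvFA, hc1, hb]
        have hg : pvG c p v (h, rl, t) = none := by simp [pvG, hsel, hbv]
        rw [hA, List.filterMap_cons_none hg]
        exact ih _ _ h1 h2
      · have hbv : ¬ t ∈ v := fun hh => hb ((hv t).mp hh)
        have hA : pvFA c p accA (h, rl, t) = (true, accA.2 ++ [(t, p ++ [(h, rl, t)])]) := by
          simp [pvFA, hc1, hb]
        have hg : pvG c p v (h, rl, t)
            = some (t, p ++ [(h, rl, t)], PySem.Set.add (PySem.Set.add v h) t) := by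
          simp [pvG, hsel, hbv]
        rw [hA, List.filterMap_cons_some hg]
        have hrec := ih (true, accA.2 ++ [(t, p ++ [(h, rl, t)])])
          (lB ++ [(t, p ++ [(h, rl, t)], PySem.Set.add (PySem.Set.add v h) t)]) (by simp)
          (pvForall₂_append h2 (List.Forall₂.cons (hrel t) List.Forall₂.nil))
        simpa [List.append_assoc] using hrec
    · by_cases hc2 : t = c
      · have hsel : pvSelB c (h, rl, t) = some (h, (h, rl, t)) := by
          simp only [pvSelB]
          rw [if_neg (fun hh => hc1 (beq_iff_eq.mp hh)), if_pos (beq_iff_eq.mpr hc2)]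
        by_cases hb : h ∈ pvVisitedA p
        · have hbv : h ∈ v := (hv h).mpr hb
          have hA : pvFA c p accA (h, rl, t) = accA := by simp [pvFA, hc1, hc2, hb]
          have hg : pvG c p v (h, rl, t) = none := by simp [pvG, hsel, hbv]
          rw [hA, List.filterMap_cons_none hg]
          exact ih _ _ h1 h2
        · have hbv : ¬ h ∈ v := fun hh => hb ((hv h).mp hh)
          have hA : pvFA c p accA (h, rl, t) = (true, accA.2 ++ [(h, p ++ [(h, rl, t)])]) := by
            simp [pvFA, hc1, hc2, hb]
          have hg : pvG c p v (h, rl, t)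
              = some (h, p ++ [(h, rl, t)], PySem.Set.add (PySem.Set.add v h) t) := by
            simp [pvG, hsel, hbv]
          rw [hA, List.filterMap_cons_some hg]
          have hrec := ih (true, accA.2 ++ [(h, p ++ [(h, rl, t)])])
            (lB ++ [(h, p ++ [(h, rl, t)], PySem.Set.add (PySem.Set.add v h) t)]) (by simp)
            (pvForall₂_append h2 (List.Forall₂.cons (hrel h) List.Forall₂.nil))
          simpa [List.append_assoc] using hrec
      · have hsel : pvSelB c (h, rl, t) = none := by
          simp only [pvSelB]
          rw [if_neg (fun hh => hc1 (beq_iff_eq.mp hh)), if_neg (fun hh => hc2 (beq_iff_eq.mp hh))]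
        have hA : pvFA c p accA (h, rl, t) = accA := by simp [pvFA, hc1, hc2]
        have hg : pvG c p v (h, rl, t) = none := by simp [pvG, hsel]
        rw [hA, List.filterMap_cons_none hg]
        exact ih _ _ h1 h2

theorem pvStep_children (edges : List (String × String × String)) (c : String)
    (p : List (String × String × String)) (v : PySem.Set String)
    (hv : ∀ x : String, x ∈ v ↔ x ∈ pvVisitedA p) :
    (pvStepA edges c p).1 = !(pvChildren (pvAdj edges) c p v).isEmpty ∧
      List.Forall₂ pvRel (pvStepA edges c p).2 (pvChildren (pvAdj edges) c p v) := by
  have main := pvStepRel c p v hv edges (false, []) [] rfl List.Forall₂.nil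
  have hA : pvStepA edges c p = edges.foldl (pvFA c p) (false, []) := rfl
  rw [hA, pvChildren_eq]
  have hlen : (edges.foldl (pvFA c p) (false, [])).2.length
      = (edges.filterMap (pvG c p v)).length := by
    simpa using List.Forall₂.length_eq main.2
  have hEmpty : (edges.foldl (pvFA c p) (false, [])).2.isEmpty
      = (edges.filterMap (pvG c p v)).isEmpty := by
    rw [Bool.eq_iff_iff, List.isEmpty_iff_length_eq_zero, List.isEmpty_iff_length_eq_zero, hlen]
  exact ⟨main.1.trans (by rw [hEmpty]), by simpa using main.2⟩

theorem pvLoop_eq (edges : List (String × String × String))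
    (lsA lsB : PySem.Set String)
    (hls : ∀ x : String, PySem.Set.contains lsA x = PySem.Set.contains lsB x) (fuel : Nat) :
    ∀ (qA : List (String × List (String × String × String)))
      (qB : List (String × List (String × String × String) × PySem.Set String))
      (paths : List (List (String × String × String))),
      List.Forall₂ pvRel qA qB →
      pvLoopA edges lsA fuel qA paths = pvRun (pvAdj edges) lsB fuel qB paths := by
  induction fuel with
  | zero =>
    intro qA qB paths hq
    cases hq with
    | nil => rfl
    | cons hab hrest => rfl
  | succ fuel ih =>
    intro qA qB paths hq
    cases hq with
    | nil => rfl
    | cons hab hrest =>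
      rename_i a b qA' qB'
      obtain ⟨c, p⟩ := a
      obtain ⟨c', p', v⟩ := b
      obtain ⟨e1, e2, hv⟩ := hab
      simp only at e1 e2
      rw [e1, e2]
      have hs := pvStep_children edges c p v hv
      by_cases hcs : (pvChildren (pvAdj edges) c p v).isEmpty = true
      · have hnil : pvChildren (pvAdj edges) c p v = [] := List.isEmpty_iff.mp hcs
        have hAnil : (pvStepA edges c p).2 = [] := by
          have hl := List.Forall₂.length_eq hs.2
          rw [hnil, List.length_nil] at hl
          exact List.eq_nil_of_length_eq_zero hl
        simp only [pvLoopA, pvRun, hs.1, hnil, hAnil, List.append_nil, Bool.not_not, hls c]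
        exact ih _ _ _ hrest
      · have hcsf : (pvChildren (pvAdj edges) c p v).isEmpty = false :=
          Bool.not_eq_true _ ▸ (by simpa using hcs)
        simp only [pvLoopA, pvRun, hs.1, hcsf, Bool.not_false, Bool.not_true, Bool.false_and]
        exact ih _ _ _ (pvForall₂_append hrest hs.2)

-- ===== VERDICT (by name: the statement is the Claim_ definition above) =====
theorem find_paths_to_leaf_spec : Claim_equal_find_paths_to_leaf := by
  intro group rels leaf_list _
  unfold Spec_find_paths_to_leaf find_paths_to_leaf find_paths_to_leaf_alt
  refine pvLoop_eq _ _ _ ?_ _ _ _ _ ?_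
  · intro x
    rw [Bool.eq_iff_iff, PySem.Set.contains_iff, PySem.Set.contains_iff]
    simp [PySem.Set.mem_ofList, PySem.Set.mem_diff, List.mem_filter, bne_iff_ne]
  · refine List.Forall₂.cons ⟨rfl, rfl, ?_⟩ List.Forall₂.nil
    intro x; simp [pvVisitedA, PySem.Set.empty]
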